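-- pv_equiv track=rewrite | github.com/sanial2001/graph | contiguously increasing numbers.py | solve
-- ===== SOURCE A (Python) =====
-- def solve(start, end):
--     q = [i + 1 for i in range(9)]
--     ans = []
--     while q:
--         val = q.pop()
--         if start <= val <= end:
--             ans.append(val)
--         last = str(val)[-1]
--         if int(last) < 9:
--             new = str(val) + str(int(last) + 1)
--             if int(new) <= end: q.append(int(new))
--     return sorted(ans)
-- ===== SOURCE B (Python) =====
-- def solve(start, end):
--     ans = []
--     for d in range(1, 10):
--         num = d
--         while num <= end:
--             if num >= start:
--                 ans.append(num)
--             if num % 10 == 9: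
--                 break
--             num = num * 10 + num % 10 + 1
--     return sorted(ans)
-- ===== Notes on version B (the rewrite author's own statement) =====
-- stated objective: simpler
-- what changed: Replaced the string-based worklist/stack BFS with a plain per-starting-digit nested loop that builds each contiguous-increasing number by integer arithmetic (num*10 + num%10 + 1), collecting in-range members directly.
import Mathlib
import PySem

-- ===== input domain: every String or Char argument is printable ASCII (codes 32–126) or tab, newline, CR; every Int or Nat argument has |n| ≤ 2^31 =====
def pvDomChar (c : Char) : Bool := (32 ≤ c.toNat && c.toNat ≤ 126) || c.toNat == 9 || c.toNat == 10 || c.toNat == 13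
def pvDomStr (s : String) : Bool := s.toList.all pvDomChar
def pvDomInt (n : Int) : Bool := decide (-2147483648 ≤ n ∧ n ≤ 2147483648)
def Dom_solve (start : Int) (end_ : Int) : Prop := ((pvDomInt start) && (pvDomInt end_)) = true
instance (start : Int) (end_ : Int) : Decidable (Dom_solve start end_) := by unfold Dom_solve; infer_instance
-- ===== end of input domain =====

-- B replaces A's string-based stack worklist by a per-starting-digit nested loop using integer
-- arithmetic (num*10 + num%10 + 1); objective: simpler. Proven equal on all inputs.


-- ===== PORT A =====
-- while q: pop from the end, test range, extend via str() if last digit < 9 and int(new) <= end.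
-- Fuel 100 suffices: the loop runs at most 45 iterations (proved in the lemmas below).
-- The `.getD` defaults are unreachable: str(val) is nonempty and its last char is a digit.
def solveLoop (start : Int) (end_ : Int) : Nat → List Int → List Int → List Int
  | 0, _, ans => PySem.List.sorted ans (fun x => x) false
  | fuel+1, q, ans =>
    match PySem.List.pop? q (-1) with
    | none => PySem.List.sorted ans (fun x => x) false
    | some (val, q') =>
      let ans' := if start ≤ val ∧ val ≤ end_ then ans ++ [val] else ans
      let s := PySem.Int.toStr val
      let last : Char := (PySem.Str.pyGet? s (-1)).getD '0'
      let lastI : Int := (PySem.Int.ofChars? [last]).getD 0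
      if lastI < 9 then
        let new : Int := (PySem.Int.ofStr? (s ++ PySem.Int.toStr (lastI + 1))).getD 0
        if new ≤ end_ then solveLoop start end_ fuel (q' ++ [new]) ans'
        else solveLoop start end_ fuel q' ans'
      else solveLoop start end_ fuel q' ans'

def solve (start : Int) (end_ : Int) : List Int :=
  solveLoop start end_ 100 ((PySem.List.pyRange 0 9 1).map (fun i => i + 1)) []

-- ===== PORT B =====
-- inner while loop of Source B; fuel 10 suffices: the last digit grows each step.
def innerB (start : Int) (end_ : Int) : Nat → Int → List Int → List Int
  | 0, _, ans => ans
  | fuel+1, num, ans =>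
    if num ≤ end_ then
      let ans' := if start ≤ num then ans ++ [num] else ans
      if PySem.Int.mod num 10 = 9 then ans'
      else innerB start end_ fuel (num * 10 + PySem.Int.mod num 10 + 1) ans'
    else ans

def solve_alt (start : Int) (end_ : Int) : List Int :=
  PySem.List.sorted
    ((PySem.List.pyRange 1 10 1).foldl (fun ans d => innerB start end_ 10 d ans) [])
    (fun x => x) false

-- ===== PRECONDITION & SPEC =====
def Spec_solve (start : Int) (end_ : Int) (out : List Int) : Prop := out = solve_alt start end_
instance (start : Int) (end_ : Int) (out : List Int) : Decidable (Spec_solve start end_ out) := by unfold Spec_solve; infer_instance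

-- ===== CLAIM (what is proved, stated in full; the proofs are below) =====
def Claim_equal_solve : Prop := ∀ (start : Int) (end_ : Int), Dom_solve start end_ → Spec_solve start end_ (solve start end_)

-- ===== LEMMAS AND PROOFS =====

-- the contiguous-increasing number with digits d, d+1, …, d+k
def cnum (d : Nat) : Nat → Int
  | 0 => d
  | k+1 => cnum d k * 10 + (d + k + 1)

-- the full chain from digit position (d,k): cnum d k, cnum d (k+1), … up to last digit 9
def cTail (d k : Nat) : List Int := (List.range (10 - (d + k))).map (fun j => cnum d (k + j))

def inRange (start end_ v : Int) : Bool := decide (start ≤ v ∧ v ≤ end_)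

-- finite facts about the 45 chain numbers, discharged by decide
lemma lastI_cnum : ∀ d < 10, ∀ k < 10, 1 ≤ d → d + k ≤ 9 →
    (PySem.Int.ofChars? [((PySem.Str.pyGet? (PySem.Int.toStr (cnum d k)) (-1)).getD '0')]).getD 0
      = ((d + k : Nat) : Int) := by decide

lemma new_cnum : ∀ d < 10, ∀ k < 10, 1 ≤ d → d + k < 9 →
    (PySem.Int.ofStr? (PySem.Int.toStr (cnum d k) ++ PySem.Int.toStr (((d + k : Nat) : Int) + 1))).getD 0
      = cnum d (k+1) := by decide

lemma mod_cnum : ∀ d < 10, ∀ k < 10, 1 ≤ d → d + k ≤ 9 →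
    PySem.Int.mod (cnum d k) 10 = ((d + k : Nat) : Int) := by decide

lemma cTail_ge : ∀ d < 10, ∀ k < 10, 1 ≤ d → d + k ≤ 9 →
    ∀ x ∈ cTail d k, cnum d k ≤ x := by decide

lemma step_cnum (d k : Nat) : cnum d k * 10 + ((d + k : Nat) : Int) + 1 = cnum d (k+1) := by
  show _ = cnum d k * 10 + ((d + k + 1 : Nat) : Int)
  push_cast; ring

lemma filter_cTail_nil {start end_ : Int} (d k : Nat) (hd : 1 ≤ d) (hk : d + k ≤ 9)
    (h : ¬ cnum d k ≤ end_) : (cTail d k).filter (inRange start end_) = [] := by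
  rw [List.filter_eq_nil_iff]
  intro x hx
  have := cTail_ge d (by omega) k (by omega) hd hk x hx
  simp [inRange]
  omega

lemma cTail_eq_cons (d k : Nat) (h : d + k < 9) : cTail d k = cnum d k :: cTail d (k+1) := by
  unfold cTail
  have h10 : 10 - (d + k) = (10 - (d + (k+1))) + 1 := by omega
  rw [h10, List.range_succ_eq_map]
  simp only [List.map_cons, List.map_map, Nat.add_zero]
  congr 1
  apply List.map_congr_left
  intro j _
  simp [Function.comp, Nat.succ_eq_add_one]
  congr 1
  omega

lemma cTail_eq_singleton (d k : Nat) (h : d + k = 9) : cTail d k = [cnum d k] := by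
  unfold cTail
  have h10 : 10 - (d + k) = 1 := by omega
  rw [h10]
  simp

-- splitting the filtered chain at its head
lemma filter_cTail_cons (start end_ : Int) (d k : Nat) (h : d + k < 9) :
    (cTail d k).filter (inRange start end_)
      = (if start ≤ cnum d k ∧ cnum d k ≤ end_ then [cnum d k] else [])
        ++ (cTail d (k+1)).filter (inRange start end_) := by
  rw [cTail_eq_cons d k h, List.filter_cons]
  by_cases hR : start ≤ cnum d k ∧ cnum d k ≤ end_
  · simp [inRange, hR]
  · simp [inRange, hR]

lemma filter_cTail_single (start end_ : Int) (d k : Nat) (h : d + k = 9) :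
    (cTail d k).filter (inRange start end_)
      = (if start ≤ cnum d k ∧ cnum d k ≤ end_ then [cnum d k] else []) := by
  rw [cTail_eq_singleton d k h, List.filter_cons]
  by_cases hR : start ≤ cnum d k ∧ cnum d k ≤ end_
  · simp [inRange, hR]
  · simp [inRange, hR]

-- ---- A-side invariant ----

def specMeasure (L : List (Nat × Nat)) : Nat := (L.map (fun p => 10 - (p.1 + p.2))).sum

lemma loopA_inv (start end_ : Int) :
    ∀ fuel (L : List (Nat × Nat)) (ans : List Int),
      (∀ p ∈ L, 1 ≤ p.1 ∧ p.1 + p.2 ≤ 9) →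
      specMeasure L ≤ fuel →
      solveLoop start end_ fuel ((L.map (fun p => cnum p.1 p.2)).reverse) ans
        = PySem.List.sorted
            (ans ++ ((L.map (fun p => cTail p.1 p.2)).flatten.filter (inRange start end_)))
            (fun x => x) false := by
  intro fuel
  induction fuel with
  | zero =>
    intro L ans hb hm
    cases L with
    | nil => simp [solveLoop]
    | cons p L' =>
      exfalso
      obtain ⟨d, k⟩ := p
      have h1 := hb (d, k) (by simp)
      simp only [specMeasure, List.map_cons, List.sum_cons, Nat.le_zero] at hm
      omega
  | succ fuel ih =>
    intro L ans hb hm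
    cases L with
    | nil => simp [solveLoop, PySem.List.pop?]
    | cons p L' =>
      obtain ⟨d, k⟩ := p
      have hd : 1 ≤ d ∧ d + k ≤ 9 := hb (d, k) (by simp)
      have hb' : ∀ p ∈ L', 1 ≤ p.1 ∧ p.1 + p.2 ≤ 9 := fun p hp => hb p (by simp [hp])
      have hm' : specMeasure L' + (10 - (d + k)) ≤ fuel + 1 := by
        simp only [specMeasure, List.map_cons, List.sum_cons] at hm ⊢
        omega
      have hq : ((((d, k) :: L').map (fun p => cnum p.1 p.2)).reverse)
          = ((L'.map (fun p => cnum p.1 p.2)).reverse) ++ [cnum d k] := by simp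
      rw [hq]
      show solveLoop start end_ (fuel+1) _ ans = _
      rw [solveLoop, PySem.List.pop?_last]
      simp only
      rw [lastI_cnum d (by omega) k (by omega) (by omega) (by omega)]
      set ans' := if start ≤ cnum d k ∧ cnum d k ≤ end_ then ans ++ [cnum d k] else ans with hans'
      have hRHS : (((d, k) :: L').map (fun p => cTail p.1 p.2)).flatten
          = cTail d k ++ (L'.map (fun p => cTail p.1 p.2)).flatten := by simp
      rw [hRHS, List.filter_append]
      by_cases hlt : d + k < 9
      · have hcast : ((d + k : Nat) : Int) < 9 := by exact_mod_cast hlt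
        rw [if_pos hcast, new_cnum d (by omega) k (by omega) (by omega) hlt]
        rw [filter_cTail_cons start end_ d k hlt]
        by_cases hend : cnum d (k+1) ≤ end_
        · rw [if_pos hend]
          have hpush : (L'.map (fun p => cnum p.1 p.2)).reverse ++ [cnum d (k+1)]
              = (((d, k+1) :: L').map (fun p => cnum p.1 p.2)).reverse := by simp
          have hbs : ∀ p ∈ ((d, k+1) :: L'), 1 ≤ p.1 ∧ p.1 + p.2 ≤ 9 := by
            intro p hp
            rw [List.mem_cons] at hp
            cases hp with
            | inl h => subst h; constructor <;> omega
            | inr h => exact hb' p h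
          rw [hpush, ih ((d, k+1) :: L') ans' hbs
            (by simp only [specMeasure, List.map_cons, List.sum_cons] at hm' ⊢; omega)]
          congr 1
          simp only [List.map_cons, List.flatten_cons, List.filter_append]
          rw [hans']
          by_cases hR : start ≤ cnum d k ∧ cnum d k ≤ end_
          · simp [hR, List.append_assoc]
          · simp [hR]
        · rw [if_neg hend]
          rw [ih L' ans' hb' (by simp only [specMeasure] at hm' ⊢; omega)]
          have hnil : (cTail d (k+1)).filter (inRange start end_) = [] :=
            filter_cTail_nil d (k+1) (by omega) (by omega) hend
          rw [hnil]
          congr 1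
          rw [hans']
          by_cases hR : start ≤ cnum d k ∧ cnum d k ≤ end_
          · simp [hR, List.append_assoc]
          · simp [hR]
      · have h9 : d + k = 9 := by omega
        have hcast : ¬ ((d + k : Nat) : Int) < 9 := by
          intro h
          have : d + k < 9 := by exact_mod_cast h
          omega
        rw [if_neg hcast]
        rw [ih L' ans' hb' (by simp only [specMeasure] at hm' ⊢; omega)]
        rw [filter_cTail_single start end_ d k h9]
        congr 1
        rw [hans']
        by_cases hR : start ≤ cnum d k ∧ cnum d k ≤ end_
        · simp [hR, List.append_assoc]
        · simp [hR]

-- ---- B-side invariant ----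

lemma innerB_inv (start end_ : Int) :
    ∀ fuel (d k : Nat) (ans : List Int), 1 ≤ d → d + k ≤ 9 → 10 ≤ fuel + (d + k) →
      innerB start end_ fuel (cnum d k) ans = ans ++ (cTail d k).filter (inRange start end_) := by
  intro fuel
  induction fuel with
  | zero => intro d k ans hd hk hf; omega
  | succ fuel ih =>
    intro d k ans hd hk hf
    rw [innerB]
    by_cases hend : cnum d k ≤ end_
    · rw [if_pos hend]
      simp only
      rw [mod_cnum d (by omega) k (by omega) hd hk]
      set ans' := if start ≤ cnum d k then ans ++ [cnum d k] else ans with hans'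
      by_cases h9 : d + k = 9
      · have hc : ((d + k : Nat) : Int) = 9 := by exact_mod_cast h9
        rw [if_pos hc, filter_cTail_single start end_ d k h9, hans']
        by_cases hR : start ≤ cnum d k
        · simp [hR, hend]
        · simp [hR, hend]
      · have hlt : d + k < 9 := by omega
        have hc : ¬ ((d + k : Nat) : Int) = 9 := by
          intro h
          exact h9 (by exact_mod_cast h)
        rw [if_neg hc, step_cnum d k]
        rw [ih d (k+1) ans' hd (by omega) (by omega)]
        rw [filter_cTail_cons start end_ d k hlt, hans']
        by_cases hR : start ≤ cnum d k
        · simp [hR, hend, List.append_assoc]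
        · simp [hR, hend]
    · rw [if_neg hend, filter_cTail_nil d k hd hk hend]
      simp

-- ---- assembling both sides to a common sorted constant list ----

def LA : List (Nat × Nat) := [(9,0),(8,0),(7,0),(6,0),(5,0),(4,0),(3,0),(2,0),(1,0)]
def CA : List Int := (LA.map (fun p => cTail p.1 p.2)).flatten
def CB : List Int :=
  cTail 1 0 ++ cTail 2 0 ++ cTail 3 0 ++ cTail 4 0 ++ cTail 5 0
    ++ cTail 6 0 ++ cTail 7 0 ++ cTail 8 0 ++ cTail 9 0
-- the 45 contiguous-increasing numbers in ascending order
def CSorted : List Int :=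
  [1,2,3,4,5,6,7,8,9,12,23,34,45,56,67,78,89,123,234,345,456,567,678,789,
   1234,2345,3456,4567,5678,6789,12345,23456,34567,45678,56789,
   123456,234567,345678,456789,1234567,2345678,3456789,12345678,23456789,123456789]

lemma solveA_eq (start end_ : Int) :
    solve start end_ = PySem.List.sorted (CA.filter (inRange start end_)) (fun x => x) false := by
  have hq : ((PySem.List.pyRange 0 9 1).map (fun i => i + 1))
      = ((LA.map (fun p => cnum p.1 p.2)).reverse) := by decide
  rw [solve, hq, loopA_inv start end_ 100 LA [] (by decide) (by decide)]
  rfl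

lemma solveB_eq (start end_ : Int) :
    solve_alt start end_ = PySem.List.sorted (CB.filter (inRange start end_)) (fun x => x) false := by
  rw [solve_alt]
  have h1 : PySem.List.pyRange 1 10 1 = [1,2,3,4,5,6,7,8,9] := by decide
  rw [h1]
  simp only [List.foldl]
  have c : ∀ d : Nat, 1 ≤ d → d ≤ 9 → ∀ ans,
      innerB start end_ 10 ((d : Nat) : Int) ans = ans ++ (cTail d 0).filter (inRange start end_) := by
    intro d h1 h9 ans
    have hcd : ((d : Nat) : Int) = cnum d 0 := rfl
    rw [hcd, innerB_inv start end_ 10 d 0 ans h1 (by omega) (by omega)]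
  rw [show ((1:Int)) = ((1:Nat):Int) by norm_num, c 1 (by omega) (by omega),
      show ((2:Int)) = ((2:Nat):Int) by norm_num, c 2 (by omega) (by omega),
      show ((3:Int)) = ((3:Nat):Int) by norm_num, c 3 (by omega) (by omega),
      show ((4:Int)) = ((4:Nat):Int) by norm_num, c 4 (by omega) (by omega),
      show ((5:Int)) = ((5:Nat):Int) by norm_num, c 5 (by omega) (by omega),
      show ((6:Int)) = ((6:Nat):Int) by norm_num, c 6 (by omega) (by omega),
      show ((7:Int)) = ((7:Nat):Int) by norm_num, c 7 (by omega) (by omega),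
      show ((8:Int)) = ((8:Nat):Int) by norm_num, c 8 (by omega) (by omega),
      show ((9:Int)) = ((9:Nat):Int) by norm_num, c 9 (by omega) (by omega)]
  congr 1
  simp [CB, List.filter_append]

lemma sorted_filter_eq (start end_ : Int) (X : List Int) (hperm : CSorted.Perm X) :
    PySem.List.sorted (X.filter (inRange start end_)) (fun x => x) false
      = CSorted.filter (inRange start end_) := by
  apply PySem.List.sorted_eq_of_perm_of_pairwise_lt
  · exact hperm.filter _
  · exact List.Pairwise.filter _ (by decide : CSorted.Pairwise (· < ·))

-- ===== VERDICT (by name: the statement is the Claim_ definition above) =====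
theorem solve_spec : Claim_equal_solve := by
  intro start end_ _
  show solve start end_ = solve_alt start end_
  rw [solveA_eq, solveB_eq,
      sorted_filter_eq start end_ CA (by decide),
      sorted_filter_eq start end_ CB (by decide)]
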